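-- pv_equiv track=rewrite | github.com/yourhonor1996/Learning-To-Code-And-ML | Quera/Algorithms and Data Structures Course/5.10-ntayi-moratab.py | ntayi2
-- ===== SOURCE A (Python) =====
-- import copy
--
-- def ntayi2(k):
--     results = []
--     start = [1]*k
--     results.append(copy.deepcopy(start))
--     for i in range(k-1, -1, -1):
--         for j in range(k-1):
--             start[i] += 1
--             results.append(copy.deepcopy(start))
--     return results
-- ===== SOURCE B (Python) =====
-- def ntayi2(k):
--     # Each cell of each snapshot is computed independently by a closed formula
--     # over the flat snapshot index t (recovering position/step via divmod),
--     # instead of mutating a running array and deep-copying it.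
--     m = k - 1
--     n = 1 + k * m if k >= 1 else 1
--
--     def cell(t, p):
--         if t == 0:
--             return 1
--         q, r = divmod(t - 1, m)
--         i = m - q
--         if p > i:
--             return k
--         if p == i:
--             return 2 + r
--         return 1
--
--     return [[cell(t, p) for p in range(k)] for t in range(n)]
-- ===== Notes on version B (the rewrite author's own statement) =====
-- stated objective: alternative
-- what changed: Replaces the mutate-and-deepcopy nested loops by a flat table build: every cell of every snapshot is computed independently by a closed formula over the flat snapshot index t, recovering the step position and count via divmod(t-1, k-1).
import Mathlib
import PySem

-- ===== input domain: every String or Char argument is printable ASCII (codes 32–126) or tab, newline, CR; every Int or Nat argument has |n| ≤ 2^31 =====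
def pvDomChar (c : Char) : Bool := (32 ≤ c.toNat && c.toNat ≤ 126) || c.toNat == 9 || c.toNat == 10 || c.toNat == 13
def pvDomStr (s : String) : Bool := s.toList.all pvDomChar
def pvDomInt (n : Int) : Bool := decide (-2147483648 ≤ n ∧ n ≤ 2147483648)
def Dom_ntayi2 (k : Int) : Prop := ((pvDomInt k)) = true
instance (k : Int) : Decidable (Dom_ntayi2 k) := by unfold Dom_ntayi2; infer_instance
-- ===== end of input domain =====

-- B replaces A's mutate-and-deepcopy nested loops by a flat table build computing
-- every cell independently from the snapshot index via divmod (objective: alternative).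

-- ===== PORT A =====
-- one inner-loop step: start[i] += 1; results.append(deepcopy(start))
def ntayi2Step (i : Int) (st : List (List Int) × List Int) : List (List Int) × List Int :=
  let s' := st.2.set i.toNat (st.2.getD i.toNat 0 + 1)
  (st.1 ++ [s'], s')

def ntayi2 (k : Int) : List (List Int) :=
  let start := List.replicate k.toNat 1
  let results : List (List Int) := [start]
  ((PySem.List.pyRange (k - 1) (-1) (-1)).foldl
    (fun st i => (PySem.List.pyRange 0 (k - 1) 1).foldl (fun st2 _ => ntayi2Step i st2) st)
    (results, start)).1

-- ===== PORT B =====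
-- cell(t, p) of Source B
def ntayi2Cell (k m t p : Int) : Int :=
  if t = 0 then 1
  else
    let q := PySem.Int.floordiv (t - 1) m
    let r := PySem.Int.mod (t - 1) m
    let i := m - q
    if p > i then k else if p = i then 2 + r else 1

def ntayi2_alt (k : Int) : List (List Int) :=
  let m := k - 1
  let n := if 1 ≤ k then 1 + k * m else 1
  (PySem.List.pyRange 0 n 1).map (fun t =>
    (PySem.List.pyRange 0 k 1).map (fun p => ntayi2Cell k m t p))

-- ===== PRECONDITION & SPEC =====
def Spec_ntayi2 (k : Int) (out : List (List Int)) : Prop := out = ntayi2_alt k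
instance (k : Int) (out : List (List Int)) : Decidable (Spec_ntayi2 k out) := by unfold Spec_ntayi2; infer_instance

-- ===== CLAIM (what is proved, stated in full; the proofs are below) =====
def Claim_equal_ntayi2 : Prop := ∀ (k : Int), Dom_ntayi2 k → Spec_ntayi2 k (ntayi2 k)

-- ===== LEMMAS AND PROOFS =====

-- intermediate form: the snapshot list written out row by row
def ntayi2Mid (k : Int) : List (List Int) :=
  List.replicate k.toNat 1 ::
    (PySem.List.pyRange (k - 1) (-1) (-1)).flatMap (fun i =>
      (PySem.List.pyRange 1 k 1).map (fun c =>
        List.replicate i.toNat 1 ++ [1 + c] ++ List.replicate (k - 1 - i).toNat k))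

-- the state of A's array while the inner loop is running at position m:
-- positions < m still hold 1, position m holds 1+t, positions > m already hold n
def ntayi2St (n m t : Nat) : List Int :=
  List.replicate m 1 ++ [(1 : Int) + t] ++ List.replicate (n - 1 - m) (n : Int)

theorem ntayi2Step_st (n m t : Nat) :
    (fun s => s.set (m : Int).toNat (s.getD (m : Int).toNat 0 + 1)) (ntayi2St n m t)
      = ntayi2St n m (t + 1) := by
  simp [ntayi2St, List.getD]
  omega

theorem ntayi2_inner (n m : Nat) (L : List Int) :
    ∀ (t : Nat) (res : List (List Int)),
      L.foldl (fun st2 _ => ntayi2Step (m : Int) st2) (res, ntayi2St n m t)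
        = (res ++ (List.range L.length).map (fun u => ntayi2St n m (t + u + 1)),
           ntayi2St n m (t + L.length)) := by
  induction L with
  | nil => intro t res; simp
  | cons x xs ih =>
      intro t res
      have hstep : ntayi2Step (m : Int) (res, ntayi2St n m t)
          = (res ++ [ntayi2St n m (t + 1)], ntayi2St n m (t + 1)) := by
        simpa [ntayi2Step] using congrArg (fun s => (res ++ [s], s)) (ntayi2Step_st n m t)
      rw [List.foldl_cons, hstep, ih (t + 1)]
      simp only [Prod.mk.injEq, List.length_cons, List.range_succ_eq_map, List.map_cons,
        List.map_map, List.append_assoc, List.singleton_append]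
      refine ⟨?_, by congr 1; omega⟩
      congr 1
      congr 1
      apply List.map_congr_left
      intro u _
      simp only [Function.comp_apply]
      congr 1
      omega

-- the rows appended while the inner loop runs at position m are exactly the mid rows for i = m
theorem ntayi2_rows (n m : Nat) (hm : m + 1 ≤ n) :
    (List.range (PySem.List.pyRange 0 ((n : Int) - 1) 1).length).map
        (fun u => ntayi2St n m (0 + u + 1))
      = (PySem.List.pyRange 1 (n : Int) 1).map (fun c =>
          List.replicate ((m : Int)).toNat 1 ++ [1 + c] ++
            List.replicate ((n : Int) - 1 - (m : Int)).toNat (n : Int)) := by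
  rw [PySem.List.length_pyRange_one, PySem.List.pyRange_one, List.map_map]
  have h0 : ((n : Int) - 1 - 0).toNat = ((n : Int) - 1).toNat := by norm_num
  rw [h0]
  apply List.map_congr_left
  intro u hu
  have ht : ((n : Int) - 1 - (m : Int)).toNat = n - 1 - m := by omega
  simp only [Function.comp_apply, ntayi2St, ht, Int.toNat_natCast]
  congr 2
  simp only [List.cons.injEq, and_true]
  omega

-- after the inner loop at position m+1 the array is exactly the state entering position m
theorem ntayi2_st_roll (n m : Nat) (h : m + 2 ≤ n) :
    ntayi2St n (m + 1) (0 + (n - 1)) = ntayi2St n m 0 := by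
  unfold ntayi2St
  have h1 : (1 : Int) + ((0 + (n - 1) : Nat) : Int) = (n : Int) := by omega
  have h2 : n - 1 - m = (n - 1 - (m + 1)) + 1 := by omega
  rw [h1, h2]
  simp [List.replicate_succ, List.append_assoc]
  rw [← List.cons_append, ← List.replicate_succ, List.replicate_succ', List.append_assoc]
  simp

-- after the inner loop at position 0 the array is [k]*k
theorem ntayi2_st_base (n : Nat) (h : 1 ≤ n) :
    ntayi2St n 0 (0 + (n - 1)) = List.replicate n (n : Int) := by
  unfold ntayi2St
  have h1 : (1 : Int) + ((0 + (n - 1) : Nat) : Int) = (n : Int) := by omega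
  have h2 : n = (n - 1) + 1 := by omega
  rw [h1]
  conv_rhs => rw [h2, List.replicate_succ]
  simp
  omega

theorem ntayi2_outer (n : Nat) (hn : 1 ≤ n) :
    ∀ (m : Nat), m + 1 ≤ n → ∀ (res : List (List Int)),
      (PySem.List.pyRange (m : Int) (-1) (-1)).foldl
          (fun st i => (PySem.List.pyRange 0 ((n : Int) - 1) 1).foldl
            (fun st2 _ => ntayi2Step i st2) st)
          (res, ntayi2St n m 0)
        = (res ++ (PySem.List.pyRange (m : Int) (-1) (-1)).flatMap (fun i =>
            (PySem.List.pyRange 1 (n : Int) 1).map (fun c =>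
              List.replicate i.toNat 1 ++ [1 + c] ++
                List.replicate ((n : Int) - 1 - i).toNat (n : Int))),
           List.replicate n (n : Int)) := by
  intro m
  induction m with
  | zero =>
      intro _ res
      rw [PySem.List.pyRange_neg_one_cons (by norm_num),
        PySem.List.pyRange_neg_one_eq_nil (by norm_num), List.foldl_cons, List.foldl_nil,
        ntayi2_inner n 0, ntayi2_rows n 0 hn]
      have hl : (PySem.List.pyRange 0 ((n : Int) - 1) 1).length = n - 1 := by
        rw [PySem.List.length_pyRange_one]; omega
      rw [hl, ntayi2_st_base n hn]
      simp
  | succ m ih =>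
      intro hm res
      have hcast : ((m + 1 : Nat) : Int) - 1 = (m : Int) := by omega
      rw [PySem.List.pyRange_neg_one_cons (by omega), hcast, List.foldl_cons,
        ntayi2_inner n (m + 1), ntayi2_rows n (m + 1) hm]
      have hl : (PySem.List.pyRange 0 ((n : Int) - 1) 1).length = n - 1 := by
        rw [PySem.List.length_pyRange_one]; omega
      rw [hl, ntayi2_st_roll n m hm, ih (by omega)]
      simp

-- ntayi2_outer with the outer range start written as an arbitrary integer equal to m
theorem ntayi2_outer' (n : Nat) (hn : 1 ≤ n) (m : Nat) (a : Int) (ha : a = (m : Int))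
    (hm : m + 1 ≤ n) (res : List (List Int)) :
    (PySem.List.pyRange a (-1) (-1)).foldl
        (fun st i => (PySem.List.pyRange 0 ((n : Int) - 1) 1).foldl
          (fun st2 _ => ntayi2Step i st2) st)
        (res, ntayi2St n m 0)
      = (res ++ (PySem.List.pyRange a (-1) (-1)).flatMap (fun i =>
          (PySem.List.pyRange 1 (n : Int) 1).map (fun c =>
            List.replicate i.toNat 1 ++ [1 + c] ++
              List.replicate ((n : Int) - 1 - i).toNat (n : Int))),
         List.replicate n (n : Int)) := by
  subst ha
  exact ntayi2_outer n hn m hm res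

theorem ntayi2_eq_mid (k : Int) : ntayi2 k = ntayi2Mid k := by
  by_cases hk : k ≤ 0
  · have h1 : PySem.List.pyRange (k - 1) (-1) (-1) = [] :=
      PySem.List.pyRange_neg_one_eq_nil (by omega)
    simp [ntayi2, ntayi2Mid, h1]
  · have hk2 : 0 < k := by omega
    set n : Nat := k.toNat with hn
    have hk' : k = (n : Int) := by omega
    have hn1 : 1 ≤ n := by omega
    have hstart : List.replicate n (1 : Int) = ntayi2St n (n - 1) 0 := by
      unfold ntayi2St
      have h2 : n = (n - 1) + 1 := by omega
      conv_lhs => rw [h2, List.replicate_succ' (n := n - 1)]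
      simp
    rw [hk']
    simp only [ntayi2, ntayi2Mid, Int.toNat_natCast]
    rw [hstart, ntayi2_outer' n hn1 (n - 1) ((n : Int) - 1) (by omega) (by omega)
      [ntayi2St n (n - 1) 0]]
    simp

-- ===== mid = alt =====

-- one snapshot of the closed-cell form equals the corresponding mid row
theorem ntayi2_row_eq (n : Nat) (hn : 2 ≤ n) (i c : Int)
    (hi : 0 ≤ i) (hi' : i ≤ (n : Int) - 1) (hc : 1 ≤ c) (hc' : c ≤ (n : Int) - 1) :
    (PySem.List.pyRange 0 (n : Int) 1).map
        (fun p => ntayi2Cell (n : Int) ((n : Int) - 1) (((n : Int) - 1 - i) * ((n : Int) - 1) + c) p)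
      = List.replicate i.toNat 1 ++ [1 + c] ++ List.replicate ((n : Int) - 1 - i).toNat (n : Int) := by
  have hd : (0:Int) < (n : Int) - 1 := by omega
  have hprod : 0 ≤ ((n : Int) - 1 - i) * ((n : Int) - 1) := mul_nonneg (by omega) (by omega)
  set t : Int := ((n : Int) - 1 - i) * ((n : Int) - 1) + c with htdef
  have ht1 : 1 ≤ t := by omega
  have hq : PySem.Int.floordiv (t - 1) ((n : Int) - 1) = (n : Int) - 1 - i := by
    rw [PySem.Int.floordiv_eq_iff_of_pos (a := t - 1) hd]
    constructor <;> nlinarith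
  have hr : PySem.Int.mod (t - 1) ((n : Int) - 1) = c - 1 := by
    have h := PySem.Int.floordiv_mul_add_mod (t - 1) ((n : Int) - 1)
    rw [hq] at h
    have ht' : t - 1 = ((n : Int) - 1 - i) * ((n : Int) - 1) + (c - 1) := by omega
    linarith [h, ht']
  apply List.ext_getElem
  · simp [PySem.List.length_pyRange_one]
    omega
  · intro p hp1 hp2
    rw [List.getElem_map, PySem.List.getElem_pyRange_one]
    simp only [ntayi2Cell]
    rw [if_neg (by omega), hq, hr]
    have hii : (n : Int) - 1 - ((n : Int) - 1 - i) = i := by omega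
    rw [hii]
    have hplen : p < n := by
      simpa [PySem.List.length_pyRange_one] using hp1
    by_cases hlt : (p : Int) < i
    · rw [if_neg (by omega), if_neg (by omega),
        List.getElem_append_left (by simp; omega),
        List.getElem_append_left (by simp; omega), List.getElem_replicate]
    · by_cases heq : (p : Int) = i
      · rw [if_neg (by omega), if_pos (by omega)]
        rw [List.getElem_append_left (by simp; omega),
          List.getElem_append_right (by simp; omega)]
        simp
        omega
      · rw [if_pos (by omega),
          List.getElem_append_right (by simp; omega), List.getElem_replicate]

-- the block of alt snapshots with indices in [A+1, A+n) (A = (n-1-i)*(n-1)) is mid's block for i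
theorem ntayi2_chunk (n : Nat) (hn : 2 ≤ n) (i : Int) (hi : 0 ≤ i) (hi' : i ≤ (n:Int) - 1) :
    (PySem.List.pyRange (((n:Int)-1-i)*((n:Int)-1)+1) (((n:Int)-1-i)*((n:Int)-1)+1+((n:Int)-1)) 1).map
        (fun t => (PySem.List.pyRange 0 (n:Int) 1).map (fun p => ntayi2Cell (n:Int) ((n:Int)-1) t p))
      = (PySem.List.pyRange 1 (n:Int) 1).map (fun c =>
          List.replicate i.toNat 1 ++ [1 + c] ++ List.replicate ((n:Int)-1-i).toNat (n:Int)) := by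
  have h1 : (((n:Int)-1-i)*((n:Int)-1)+1+((n:Int)-1)) - (((n:Int)-1-i)*((n:Int)-1)+1) = (n:Int)-1 := by
    ring
  rw [PySem.List.pyRange_one (((n:Int)-1-i)*((n:Int)-1)+1) (((n:Int)-1-i)*((n:Int)-1)+1+((n:Int)-1)),
    PySem.List.pyRange_one 1 ((n:Int)), h1, List.map_map, List.map_map]
  apply List.map_congr_left
  intro j hj
  have hjlt : j < ((n:Int) - 1).toNat := List.mem_range.mp hj
  have harg : ((n:Int)-1-i)*((n:Int)-1)+1+(j:Int) = ((n:Int)-1-i)*((n:Int)-1)+(1+(j:Int)) := by ring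
  simp only [Function.comp_apply]
  rw [harg, ntayi2_row_eq n hn i (1+(j:Int)) hi hi' (by omega) (by omega)]

theorem ntayi2_blocks (n : Nat) (hn : 2 ≤ n) :
    ∀ (m : Nat), m + 1 ≤ n → ∀ (a : Int), a = (m:Int) →
    (PySem.List.pyRange a (-1) (-1)).flatMap (fun i =>
        (PySem.List.pyRange 1 (n:Int) 1).map (fun c =>
          List.replicate i.toNat 1 ++ [1 + c] ++ List.replicate ((n:Int)-1-i).toNat (n:Int)))
      = (PySem.List.pyRange (((n:Int)-1-(m:Int))*((n:Int)-1)+1) ((n:Int)*((n:Int)-1)+1) 1).map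
          (fun t => (PySem.List.pyRange 0 (n:Int) 1).map (fun p => ntayi2Cell (n:Int) ((n:Int)-1) t p)) := by
  intro m
  induction m with
  | zero =>
      intro _ a ha
      subst ha
      rw [PySem.List.pyRange_neg_one_cons (by norm_num),
        PySem.List.pyRange_neg_one_eq_nil (by norm_num)]
      have hend : (n:Int)*((n:Int)-1)+1 = ((n:Int)-1-((0:Nat):Int))*((n:Int)-1)+1+((n:Int)-1) := by
        push_cast; ring
      rw [hend, List.flatMap_cons, List.flatMap_nil, List.append_nil]
      have := ntayi2_chunk n hn 0 (by omega) (by omega)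
      simpa using this.symm
  | succ m ih =>
      intro hm a ha
      subst ha
      rw [PySem.List.pyRange_neg_one_cons (by omega)]
      have hcast : ((m + 1 : Nat) : Int) - 1 = (m : Int) := by push_cast; ring
      rw [List.flatMap_cons, hcast, ih (by omega) (m:Int) rfl]
      have hstep : ((n:Int)-1-((m:Nat):Int))*((n:Int)-1)+1
          = ((n:Int)-1-((m+1:Nat):Int))*((n:Int)-1)+1+((n:Int)-1) := by
        push_cast
        ring
      have hd : (0:Int) ≤ (n:Int)-1 := by omega
      have hle1 : ((n:Int)-1-((m+1:Nat):Int))*((n:Int)-1)+1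
          ≤ ((n:Int)-1-((m:Nat):Int))*((n:Int)-1)+1 := by
        have : ((n:Int)-1-((m+1:Nat):Int)) ≤ ((n:Int)-1-((m:Nat):Int)) := by push_cast; omega
        nlinarith
      have hle2 : ((n:Int)-1-((m:Nat):Int))*((n:Int)-1)+1 ≤ (n:Int)*((n:Int)-1)+1 := by
        have h1 : ((n:Int)-1-((m:Nat):Int)) ≤ (n:Int) := by omega
        have h0 : (0:Int) ≤ ((n:Int)-1-((m:Nat):Int)) := by omega
        nlinarith
      rw [PySem.List.pyRange_one_append (((n:Int)-1-((m+1:Nat):Int))*((n:Int)-1)+1)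
        (((n:Int)-1-((m:Nat):Int))*((n:Int)-1)+1) ((n:Int)*((n:Int)-1)+1) hle1 hle2,
        List.map_append]
      congr 1
      have := ntayi2_chunk n hn ((m+1:Nat):Int) (by push_cast; omega) (by push_cast; omega)
      rw [hstep]
      exact this.symm

theorem ntayi2_mid_eq_alt (k : Int) : ntayi2Mid k = ntayi2_alt k := by
  by_cases hk : k ≤ 0
  · have h1 : PySem.List.pyRange (k - 1) (-1) (-1) = [] :=
      PySem.List.pyRange_neg_one_eq_nil (by omega)
    have h2 : PySem.List.pyRange 0 k 1 = [] :=
      PySem.List.pyRange_one_eq_nil (by omega)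
    have h3 : k.toNat = 0 := by omega
    simp [ntayi2Mid, ntayi2_alt, h1, h2, h3, if_neg (show ¬ (1:Int) ≤ k by omega)]
  · by_cases hk1 : k = 1
    · subst hk1
      decide
    · have hk2 : 2 ≤ k := by omega
      obtain ⟨n, rfl⟩ : ∃ n : Nat, k = (n : Int) := ⟨k.toNat, by omega⟩
      have hn2 : 2 ≤ n := by exact_mod_cast hk2
      have hpos : (0:Int) < 1 + (n:Int) * ((n:Int) - 1) := by nlinarith
      simp only [ntayi2Mid, ntayi2_alt, if_pos (show (1:Int) ≤ (n:Int) by omega)]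
      have hcons : PySem.List.pyRange 0 (1+(n:Int)*((n:Int)-1)) 1
          = 0 :: PySem.List.pyRange (0+1) (1+(n:Int)*((n:Int)-1)) 1 :=
        PySem.List.pyRange_one_cons hpos
      norm_num at hcons
      rw [hcons, List.map_cons]
      congr 1
      · have : ∀ p, ntayi2Cell (n:Int) ((n:Int)-1) 0 p = 1 := by
          intro p; simp [ntayi2Cell]
        simp only [this, List.map_const']
        rw [PySem.List.length_pyRange_one]
        simp
      · have hblocks := ntayi2_blocks n hn2 (n-1) (by omega) ((n:Int)-1) (by omega)
        have hstart : ((n:Int)-1-((n-1:Nat):Int))*((n:Int)-1)+1 = 1 := by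
          have : ((n:Int)-1-((n-1:Nat):Int)) = 0 := by omega
          rw [this]; ring
        have hend : (1:Int) + (n:Int)*((n:Int)-1) = (n:Int)*((n:Int)-1)+1 := by ring
        rw [hstart] at hblocks
        rw [hend, hblocks]

-- ===== VERDICT (by name: the statement is the Claim_ definition above) =====
theorem ntayi2_spec : Claim_equal_ntayi2 := by
  intro k _
  unfold Spec_ntayi2
  rw [ntayi2_eq_mid, ntayi2_mid_eq_alt]
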